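-- pv_equiv track=rewrite | github.com/OverHeMin/Manuscript-editing-and-proofreading-system | apps/worker-py/src/manuscript_quality/medical_specialized.py | _find_first_mentioned_group
-- ===== SOURCE A (Python) =====
-- def _find_first_mentioned_group(text: str, groups: object) -> str | None:
--     candidates: list[tuple[int, str]] = []
--     for group in groups:
--         if not isinstance(group, str):
--             continue
--         position = text.find(group.lower())
--         if position >= 0:
--             candidates.append((position, group))
--
--     if not candidates:
--         return None
--
--     candidates.sort(key=lambda item: item[0])
--     return candidates[0][1]
-- ===== SOURCE B (Python) =====
-- def _find_first_mentioned_group(text: str, groups: object) -> str | None: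
--     best_pos = None
--     best_group = None
--     for group in groups:
--         if not isinstance(group, str):
--             continue
--         position = text.find(group.lower())
--         if position >= 0 and (best_pos is None or position < best_pos):
--             best_pos = position
--             best_group = group
--     return best_group
-- ===== Notes on version B (the rewrite author's own statement) =====
-- stated objective: simpler
-- what changed: Replaces the candidate-list build plus stable sort with a single pass that keeps the running best (position, group), updating only on a strictly smaller position so the first group at the minimal position wins.
import Mathlib
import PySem

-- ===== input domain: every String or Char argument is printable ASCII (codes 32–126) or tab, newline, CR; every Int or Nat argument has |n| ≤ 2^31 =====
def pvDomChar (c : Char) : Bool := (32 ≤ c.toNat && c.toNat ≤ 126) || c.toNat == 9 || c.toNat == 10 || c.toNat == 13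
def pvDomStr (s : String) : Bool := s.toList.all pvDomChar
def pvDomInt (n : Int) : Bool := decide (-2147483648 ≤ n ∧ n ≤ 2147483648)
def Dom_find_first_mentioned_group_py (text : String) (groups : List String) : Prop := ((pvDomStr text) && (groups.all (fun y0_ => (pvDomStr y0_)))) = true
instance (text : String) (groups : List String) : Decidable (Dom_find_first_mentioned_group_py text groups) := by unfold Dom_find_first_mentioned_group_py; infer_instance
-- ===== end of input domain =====

-- B replaces A's candidate-list build + stable sort with a single running-best pass (simpler, no sort).

-- ===== PORT A =====
def find_first_mentioned_group_py (text : String) (groups : List String) : Option String :=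
  let candidates : List (Int × String) := groups.foldl (fun acc group =>
    let position := PySem.Str.find text (PySem.Str.lower group)
    if 0 ≤ position then acc ++ [(position, group)] else acc) []
  if candidates = [] then none
  else
    match PySem.List.sorted candidates (fun item => item.1) false with
    | [] => none
    | c :: _ => some c.2

-- ===== PORT B =====
def find_first_mentioned_group_py_alt (text : String) (groups : List String) : Option String :=
  let best : Option (Int × String) := groups.foldl (fun best group =>
    let position := PySem.Str.find text (PySem.Str.lower group)
    match best with
    | none => if 0 ≤ position then some (position, group) else none
    | some bp => if 0 ≤ position ∧ position < bp.1 then some (position, group) else some bp) none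
  best.map Prod.snd

-- ===== PRECONDITION & SPEC =====
def Spec_find_first_mentioned_group_py (text : String) (groups : List String) (out : Option String) : Prop := out = find_first_mentioned_group_py_alt text groups
instance (text : String) (groups : List String) (out : Option String) : Decidable (Spec_find_first_mentioned_group_py text groups out) := by unfold Spec_find_first_mentioned_group_py; infer_instance

-- ===== CLAIM (what is proved, stated in full; the proofs are below) =====
def Claim_equal_find_first_mentioned_group_py : Prop := ∀ (text : String) (groups : List String), Dom_find_first_mentioned_group_py text groups → Spec_find_first_mentioned_group_py text groups (find_first_mentioned_group_py text groups)

-- ===== LEMMAS AND PROOFS =====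

-- first element of acc attaining the minimal first component (strict-< scan)
def pvFirstMin (acc : List (Int × String)) : Option (Int × String) :=
  acc.foldl (fun b c => match b with | none => some c | some p => if c.1 < p.1 then some c else some p) none

lemma pvFirstMin_append (acc : List (Int × String)) (c : Int × String) :
    pvFirstMin (acc ++ [c]) =
      match pvFirstMin acc with
      | none => some c
      | some p => if c.1 < p.1 then some c else some p := by
  simp [pvFirstMin, List.foldl_append]

lemma head_insertBy (x : Int × String) (ys : List (Int × String)) :
    (PySem.List.insertBy (fun a b => decide (a.1 < b.1)) x ys).head? =
      match ys.head? with
      | none => some x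
      | some y => if x.1 < y.1 then some x else some y := by
  cases ys with
  | nil => rfl
  | cons y ys =>
    simp only [PySem.List.insertBy, List.head?]
    by_cases h : x.1 < y.1 <;> simp [h]

lemma head_sorted (acc : List (Int × String)) :
    (PySem.List.sorted acc (fun item => item.1) false).head? = pvFirstMin acc := by
  induction acc using List.reverseRecOn with
  | nil => rfl
  | append_singleton acc c ih =>
    rw [PySem.List.sorted_eq_foldl_insertBy, List.foldl_append, List.foldl,
        ← PySem.List.sorted_eq_foldl_insertBy, List.foldl, head_insertBy, ih,
        pvFirstMin_append]

lemma pvFirstMin_nil_iff (acc : List (Int × String)) : pvFirstMin acc = none ↔ acc = [] := by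
  constructor
  · intro h
    by_contra hne
    have hs : PySem.List.sorted acc (fun item => item.1) false ≠ [] := by
      simpa [PySem.List.sorted_eq_nil_iff] using hne
    rcases List.exists_cons_of_ne_nil hs with ⟨c, t, hct⟩
    rw [← head_sorted, hct] at h
    simp at h
  · intro h; subst h; rfl

lemma fold_agree (text : String) (groups : List String) :
    ∀ acc : List (Int × String),
      groups.foldl (fun best group =>
        let position := PySem.Str.find text (PySem.Str.lower group)
        match best with
        | none => if 0 ≤ position then some (position, group) else none
        | some bp => if 0 ≤ position ∧ position < bp.1 then some (position, group) else some bp)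
        (pvFirstMin acc)
      = pvFirstMin (groups.foldl (fun acc group =>
          let position := PySem.Str.find text (PySem.Str.lower group)
          if 0 ≤ position then acc ++ [(position, group)] else acc) acc) := by
  induction groups with
  | nil => intro acc; rfl
  | cons g gs ih =>
    intro acc
    simp only [List.foldl]
    have hstep :
        (match pvFirstMin acc with
          | none => if 0 ≤ PySem.Str.find text (PySem.Str.lower g) then some (PySem.Str.find text (PySem.Str.lower g), g) else none
          | some bp => if 0 ≤ PySem.Str.find text (PySem.Str.lower g) ∧ PySem.Str.find text (PySem.Str.lower g) < bp.1 then some (PySem.Str.find text (PySem.Str.lower g), g) else some bp)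
        = pvFirstMin (if 0 ≤ PySem.Str.find text (PySem.Str.lower g) then acc ++ [(PySem.Str.find text (PySem.Str.lower g), g)] else acc) := by
      set p := PySem.Str.find text (PySem.Str.lower g) with hp
      by_cases hpos : 0 ≤ p
      · conv_rhs => rw [if_pos hpos]
        rw [pvFirstMin_append]
        cases hb : pvFirstMin acc with
        | none => simp [hpos]
        | some bp =>
          by_cases hlt : p < bp.1 <;> simp [hpos, hlt]
      · conv_rhs => rw [if_neg hpos]
        cases hb : pvFirstMin acc with
        | none => simp [hpos]
        | some bp => simp [hpos]
    rw [hstep, ih]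

-- ===== VERDICT (by name: the statement is the Claim_ definition above) =====
theorem find_first_mentioned_group_py_spec : Claim_equal_find_first_mentioned_group_py := by
  intro text groups _
  show find_first_mentioned_group_py text groups = find_first_mentioned_group_py_alt text groups
  unfold find_first_mentioned_group_py find_first_mentioned_group_py_alt
  simp only []
  have hfold := fold_agree text groups []
  have h0 : pvFirstMin ([] : List (Int × String)) = none := rfl
  rw [h0] at hfold
  rw [hfold]
  set candidates := groups.foldl (fun acc group =>
    let position := PySem.Str.find text (PySem.Str.lower group)
    if 0 ≤ position then acc ++ [(position, group)] else acc) ([] : List (Int × String)) with hc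
  by_cases hnil : candidates = []
  · rw [if_pos hnil, hnil]
    rfl
  · rw [if_neg hnil]
    rcases Option.ne_none_iff_exists'.mp (by
      intro h; exact hnil ((pvFirstMin_nil_iff candidates).mp h)) with ⟨c, hcm⟩
    have hhead := head_sorted candidates
    rw [hcm] at hhead
    rcases hs : PySem.List.sorted candidates (fun item => item.1) false with _ | ⟨m, t⟩
    · rw [hs] at hhead; simp at hhead
    · rw [hs] at hhead
      simp only [List.head?] at hhead
      rw [hcm]
      injection hhead with hmc
      simp [hmc]
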